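-- pv_equiv track=rewrite | github.com/azazo1/campus-bot | src/classtable/generate_latex_table.py | time_to_slot
-- ===== SOURCE A (Python) =====
-- from typing import Optional
--
-- time_slots = [
--     ((8, 0), (8, 45)), ((8, 50), (9, 35)), ((9, 50), (10, 35)), ((10, 40), (11, 25)), ((11, 30), (12, 15)),  # 上午
--     ((13, 0), (13, 45)), ((13, 50), (14, 35)), ((14, 50), (15, 35)), ((15, 40), (16, 25)), ((16, 30), (17, 15)),  # 下午
--     ((18, 0), (18, 45)), ((18, 50), (19, 35)), ((19, 40), (20, 25))  # 晚上
-- ]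
--
-- def time_to_slot(hour: int, minute: int) -> Optional[int]:
--     """
--     给定一个小时和分钟, 返回对应的节次编号.
--     Tips: 遍历 time_slots, 看这个时间落在哪个范围内的开始 - 结束之间.
--     这里假设 start_time 就落在对应节次的开始时间或稍后一点点.
--
--     :param hour: 小时
--     :param minute: 分钟
--     :return: 将小时和分钟映射到节次编号 (1 开始计数)
--     """
--     for i, ((sh, sm), (eh, em)) in enumerate(time_slots, start=1):
--         start_time = sh * 60 + sm
--         end_time = eh * 60 + em
--         current = hour * 60 + minute
--         # 这里假设当前时间点 >= 节次的开始时间 且 < 节次的结束时间，即为该节次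
--         if start_time <= current <= end_time:
--             return i
--     return None
-- ===== SOURCE B (Python) =====
-- from typing import Optional
--
-- time_slots = [
--     ((8, 0), (8, 45)), ((8, 50), (9, 35)), ((9, 50), (10, 35)), ((10, 40), (11, 25)), ((11, 30), (12, 15)),  # morning
--     ((13, 0), (13, 45)), ((13, 50), (14, 35)), ((14, 50), (15, 35)), ((15, 40), (16, 25)), ((16, 30), (17, 15)),  # afternoon
--     ((18, 0), (18, 45)), ((18, 50), (19, 35)), ((19, 40), (20, 25))  # evening
-- ]
--
-- # Precomputed index: minute-of-day -> slot number, built once at module load.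
-- _minute_to_slot = {}
-- for _i, ((_sh, _sm), (_eh, _em)) in enumerate(time_slots, start=1):
--     for _m in range(_sh * 60 + _sm, _eh * 60 + _em + 1):
--         _minute_to_slot[_m] = _i
--
-- def time_to_slot(hour: int, minute: int) -> Optional[int]:
--     return _minute_to_slot.get(hour * 60 + minute)
-- ===== Notes on version B (the rewrite author's own statement) =====
-- stated objective: simpler
-- what changed: Replaces the per-call linear scan over time_slots with a minute-of-day -> slot dictionary precomputed once at module load, so the function body is a single dict lookup.
import Mathlib
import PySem

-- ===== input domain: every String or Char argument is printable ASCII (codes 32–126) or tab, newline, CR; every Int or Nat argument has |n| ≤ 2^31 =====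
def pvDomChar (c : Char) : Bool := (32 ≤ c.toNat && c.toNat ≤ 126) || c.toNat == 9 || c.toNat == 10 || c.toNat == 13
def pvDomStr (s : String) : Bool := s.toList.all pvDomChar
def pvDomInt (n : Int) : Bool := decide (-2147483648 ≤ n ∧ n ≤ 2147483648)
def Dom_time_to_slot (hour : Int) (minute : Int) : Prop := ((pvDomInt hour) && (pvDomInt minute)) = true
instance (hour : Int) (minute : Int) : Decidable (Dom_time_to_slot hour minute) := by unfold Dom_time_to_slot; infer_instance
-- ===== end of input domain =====

-- B replaces A's per-call scan over time_slots with a minute-of-day -> slot dict built once (simpler call body).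

-- ===== PORT A =====
def timeSlots : List ((Int × Int) × (Int × Int)) :=
  [((8, 0), (8, 45)), ((8, 50), (9, 35)), ((9, 50), (10, 35)), ((10, 40), (11, 25)), ((11, 30), (12, 15)),
   ((13, 0), (13, 45)), ((13, 50), (14, 35)), ((14, 50), (15, 35)), ((15, 40), (16, 25)), ((16, 30), (17, 15)),
   ((18, 0), (18, 45)), ((18, 50), (19, 35)), ((19, 40), (20, 25))]

-- the 'for … return/fall through' loop of A
def timeToSlotGo (hour minute : Int) : List (Int × ((Int × Int) × (Int × Int))) → Option Int
  | [] => none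
  | (i, ((sh, sm), (eh, em))) :: rest =>
      let startTime := sh * 60 + sm
      let endTime := eh * 60 + em
      let current := hour * 60 + minute
      if startTime ≤ current ∧ current ≤ endTime then some i
      else timeToSlotGo hour minute rest

def time_to_slot (hour : Int) (minute : Int) : Option Int :=
  timeToSlotGo hour minute (PySem.List.enumerate timeSlots 1)

-- ===== PORT B =====
-- the module-level dict built by B's loop: minute-of-day -> slot number
def minuteToSlot : PySem.Dict Int Int :=
  (PySem.List.enumerate timeSlots 1).foldl
    (fun d p =>
      match p with
      | (i, ((sh, sm), (eh, em))) =>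
          (PySem.List.pyRange (sh * 60 + sm) (eh * 60 + em + 1) 1).foldl
            (fun d m => d.insert m i) d)
    PySem.Dict.empty

def time_to_slot_alt (hour : Int) (minute : Int) : Option Int :=
  minuteToSlot.get? (hour * 60 + minute)

-- ===== PRECONDITION & SPEC =====
def Spec_time_to_slot (hour : Int) (minute : Int) (out : Option Int) : Prop := out = time_to_slot_alt hour minute
instance (hour : Int) (minute : Int) (out : Option Int) : Decidable (Spec_time_to_slot hour minute out) := by unfold Spec_time_to_slot; infer_instance

-- ===== CLAIM (what is proved, stated in full; the proofs are below) =====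
def Claim_equal_time_to_slot : Prop := ∀ (hour : Int) (minute : Int), Dom_time_to_slot hour minute → Spec_time_to_slot hour minute (time_to_slot hour minute)

-- ===== LEMMAS AND PROOFS =====

-- proof-only helper: the common value of both programs, as an explicit if-chain over current minute
def slotSpec (c : Int) : Option Int :=
  if 480 ≤ c ∧ c ≤ 525 then some 1 else if 530 ≤ c ∧ c ≤ 575 then some 2
  else if 590 ≤ c ∧ c ≤ 635 then some 3 else if 640 ≤ c ∧ c ≤ 685 then some 4
  else if 690 ≤ c ∧ c ≤ 735 then some 5 else if 780 ≤ c ∧ c ≤ 825 then some 6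
  else if 830 ≤ c ∧ c ≤ 875 then some 7 else if 890 ≤ c ∧ c ≤ 935 then some 8
  else if 940 ≤ c ∧ c ≤ 985 then some 9 else if 990 ≤ c ∧ c ≤ 1035 then some 10
  else if 1080 ≤ c ∧ c ≤ 1125 then some 11 else if 1130 ≤ c ∧ c ≤ 1175 then some 12
  else if 1180 ≤ c ∧ c ≤ 1225 then some 13 else none

-- proof-only helper: one step of B's dict-building loop
def buildOne : Int × ((Int × Int) × (Int × Int)) → PySem.Dict Int Int → PySem.Dict Int Int
  | (i, ((sh, sm), (eh, em))), d =>
      (PySem.List.pyRange (sh * 60 + sm) (eh * 60 + em + 1) 1).foldl (fun d m => d.insert m i) d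

-- a fold of inserts (all with value i) leaves keys outside l untouched …
theorem foldl_ins_not_mem (i c : Int) (l : List Int) (d : PySem.Dict Int Int) (h : c ∉ l) :
    (l.foldl (fun d m => d.insert m i) d).get? c = d.get? c := by
  induction l generalizing d with
  | nil => rfl
  | cons m rest ih =>
      simp only [List.foldl_cons]
      rw [ih _ (fun hm => h (List.mem_cons_of_mem _ hm)),
        PySem.Dict.get?_insert_of_ne _ _ (fun he => h (by rw [he]; exact List.mem_cons_self))]

-- … and maps every key of l to i
theorem foldl_ins_mem (i c : Int) (l : List Int) (d : PySem.Dict Int Int) (h : c ∈ l) :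
    (l.foldl (fun d m => d.insert m i) d).get? c = some i := by
  induction l generalizing d with
  | nil => simp at h
  | cons m rest ih =>
      simp only [List.foldl_cons]
      by_cases hr : c ∈ rest
      · exact ih _ hr
      · have hc : c = m := by rcases List.mem_cons.mp h with h' | h' <;> tauto
        rw [foldl_ins_not_mem _ _ _ _ hr, hc, PySem.Dict.get?_insert_self]

theorem get?_buildOne (i sh sm eh em c : Int) (d : PySem.Dict Int Int) :
    (buildOne (i, ((sh, sm), (eh, em))) d).get? c
      = if sh * 60 + sm ≤ c ∧ c ≤ eh * 60 + em then some i else d.get? c := by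
  simp only [buildOne]
  by_cases h : sh * 60 + sm ≤ c ∧ c ≤ eh * 60 + em
  · rw [foldl_ins_mem _ _ _ _ (by rw [PySem.List.mem_pyRange_one]; omega), if_pos h]
  · rw [foldl_ins_not_mem _ _ _ _ (by rw [PySem.List.mem_pyRange_one]; omega), if_neg h]

theorem minuteToSlot_eq_foldl_buildOne :
    minuteToSlot = (PySem.List.enumerate timeSlots 1).foldl (fun d p => buildOne p d) PySem.Dict.empty := rfl

set_option maxHeartbeats 1000000 in
theorem lookup_eq_spec (c : Int) : minuteToSlot.get? c = slotSpec c := by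
  rw [minuteToSlot_eq_foldl_buildOne]
  simp only [timeSlots, PySem.List.enumerate_cons, PySem.List.enumerate_nil,
    List.foldl_cons, List.foldl_nil]
  simp only [get?_buildOne, PySem.Dict.get?_empty, slotSpec]
  norm_num
  by_cases h1 : 480 ≤ c ∧ c ≤ 525
  · simp only [if_pos h1, if_neg (show ¬(530 ≤ c ∧ c ≤ 575) by omega), if_neg (show ¬(590 ≤ c ∧ c ≤ 635) by omega), if_neg (show ¬(640 ≤ c ∧ c ≤ 685) by omega), if_neg (show ¬(690 ≤ c ∧ c ≤ 735) by omega), if_neg (show ¬(780 ≤ c ∧ c ≤ 825) by omega), if_neg (show ¬(830 ≤ c ∧ c ≤ 875) by omega), if_neg (show ¬(890 ≤ c ∧ c ≤ 935) by omega), if_neg (show ¬(940 ≤ c ∧ c ≤ 985) by omega), if_neg (show ¬(990 ≤ c ∧ c ≤ 1035) by omega), if_neg (show ¬(1080 ≤ c ∧ c ≤ 1125) by omega), if_neg (show ¬(1130 ≤ c ∧ c ≤ 1175) by omega), if_neg (show ¬(1180 ≤ c ∧ c ≤ 1225) by omega)]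
  by_cases h2 : 530 ≤ c ∧ c ≤ 575
  · simp only [if_pos h2, if_neg h1, if_neg (show ¬(590 ≤ c ∧ c ≤ 635) by omega), if_neg (show ¬(640 ≤ c ∧ c ≤ 685) by omega), if_neg (show ¬(690 ≤ c ∧ c ≤ 735) by omega), if_neg (show ¬(780 ≤ c ∧ c ≤ 825) by omega), if_neg (show ¬(830 ≤ c ∧ c ≤ 875) by omega), if_neg (show ¬(890 ≤ c ∧ c ≤ 935) by omega), if_neg (show ¬(940 ≤ c ∧ c ≤ 985) by omega), if_neg (show ¬(990 ≤ c ∧ c ≤ 1035) by omega), if_neg (show ¬(1080 ≤ c ∧ c ≤ 1125) by omega), if_neg (show ¬(1130 ≤ c ∧ c ≤ 1175) by omega), if_neg (show ¬(1180 ≤ c ∧ c ≤ 1225) by omega)]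
  by_cases h3 : 590 ≤ c ∧ c ≤ 635
  · simp only [if_pos h3, if_neg h1, if_neg h2, if_neg (show ¬(640 ≤ c ∧ c ≤ 685) by omega), if_neg (show ¬(690 ≤ c ∧ c ≤ 735) by omega), if_neg (show ¬(780 ≤ c ∧ c ≤ 825) by omega), if_neg (show ¬(830 ≤ c ∧ c ≤ 875) by omega), if_neg (show ¬(890 ≤ c ∧ c ≤ 935) by omega), if_neg (show ¬(940 ≤ c ∧ c ≤ 985) by omega), if_neg (show ¬(990 ≤ c ∧ c ≤ 1035) by omega), if_neg (show ¬(1080 ≤ c ∧ c ≤ 1125) by omega), if_neg (show ¬(1130 ≤ c ∧ c ≤ 1175) by omega), if_neg (show ¬(1180 ≤ c ∧ c ≤ 1225) by omega)]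
  by_cases h4 : 640 ≤ c ∧ c ≤ 685
  · simp only [if_pos h4, if_neg h1, if_neg h2, if_neg h3, if_neg (show ¬(690 ≤ c ∧ c ≤ 735) by omega), if_neg (show ¬(780 ≤ c ∧ c ≤ 825) by omega), if_neg (show ¬(830 ≤ c ∧ c ≤ 875) by omega), if_neg (show ¬(890 ≤ c ∧ c ≤ 935) by omega), if_neg (show ¬(940 ≤ c ∧ c ≤ 985) by omega), if_neg (show ¬(990 ≤ c ∧ c ≤ 1035) by omega), if_neg (show ¬(1080 ≤ c ∧ c ≤ 1125) by omega), if_neg (show ¬(1130 ≤ c ∧ c ≤ 1175) by omega), if_neg (show ¬(1180 ≤ c ∧ c ≤ 1225) by omega)]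
  by_cases h5 : 690 ≤ c ∧ c ≤ 735
  · simp only [if_pos h5, if_neg h1, if_neg h2, if_neg h3, if_neg h4, if_neg (show ¬(780 ≤ c ∧ c ≤ 825) by omega), if_neg (show ¬(830 ≤ c ∧ c ≤ 875) by omega), if_neg (show ¬(890 ≤ c ∧ c ≤ 935) by omega), if_neg (show ¬(940 ≤ c ∧ c ≤ 985) by omega), if_neg (show ¬(990 ≤ c ∧ c ≤ 1035) by omega), if_neg (show ¬(1080 ≤ c ∧ c ≤ 1125) by omega), if_neg (show ¬(1130 ≤ c ∧ c ≤ 1175) by omega), if_neg (show ¬(1180 ≤ c ∧ c ≤ 1225) by omega)]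
  by_cases h6 : 780 ≤ c ∧ c ≤ 825
  · simp only [if_pos h6, if_neg h1, if_neg h2, if_neg h3, if_neg h4, if_neg h5, if_neg (show ¬(830 ≤ c ∧ c ≤ 875) by omega), if_neg (show ¬(890 ≤ c ∧ c ≤ 935) by omega), if_neg (show ¬(940 ≤ c ∧ c ≤ 985) by omega), if_neg (show ¬(990 ≤ c ∧ c ≤ 1035) by omega), if_neg (show ¬(1080 ≤ c ∧ c ≤ 1125) by omega), if_neg (show ¬(1130 ≤ c ∧ c ≤ 1175) by omega), if_neg (show ¬(1180 ≤ c ∧ c ≤ 1225) by omega)]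
  by_cases h7 : 830 ≤ c ∧ c ≤ 875
  · simp only [if_pos h7, if_neg h1, if_neg h2, if_neg h3, if_neg h4, if_neg h5, if_neg h6, if_neg (show ¬(890 ≤ c ∧ c ≤ 935) by omega), if_neg (show ¬(940 ≤ c ∧ c ≤ 985) by omega), if_neg (show ¬(990 ≤ c ∧ c ≤ 1035) by omega), if_neg (show ¬(1080 ≤ c ∧ c ≤ 1125) by omega), if_neg (show ¬(1130 ≤ c ∧ c ≤ 1175) by omega), if_neg (show ¬(1180 ≤ c ∧ c ≤ 1225) by omega)]
  by_cases h8 : 890 ≤ c ∧ c ≤ 935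
  · simp only [if_pos h8, if_neg h1, if_neg h2, if_neg h3, if_neg h4, if_neg h5, if_neg h6, if_neg h7, if_neg (show ¬(940 ≤ c ∧ c ≤ 985) by omega), if_neg (show ¬(990 ≤ c ∧ c ≤ 1035) by omega), if_neg (show ¬(1080 ≤ c ∧ c ≤ 1125) by omega), if_neg (show ¬(1130 ≤ c ∧ c ≤ 1175) by omega), if_neg (show ¬(1180 ≤ c ∧ c ≤ 1225) by omega)]
  by_cases h9 : 940 ≤ c ∧ c ≤ 985
  · simp only [if_pos h9, if_neg h1, if_neg h2, if_neg h3, if_neg h4, if_neg h5, if_neg h6, if_neg h7, if_neg h8, if_neg (show ¬(990 ≤ c ∧ c ≤ 1035) by omega), if_neg (show ¬(1080 ≤ c ∧ c ≤ 1125) by omega), if_neg (show ¬(1130 ≤ c ∧ c ≤ 1175) by omega), if_neg (show ¬(1180 ≤ c ∧ c ≤ 1225) by omega)]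
  by_cases h10 : 990 ≤ c ∧ c ≤ 1035
  · simp only [if_pos h10, if_neg h1, if_neg h2, if_neg h3, if_neg h4, if_neg h5, if_neg h6, if_neg h7, if_neg h8, if_neg h9, if_neg (show ¬(1080 ≤ c ∧ c ≤ 1125) by omega), if_neg (show ¬(1130 ≤ c ∧ c ≤ 1175) by omega), if_neg (show ¬(1180 ≤ c ∧ c ≤ 1225) by omega)]
  by_cases h11 : 1080 ≤ c ∧ c ≤ 1125
  · simp only [if_pos h11, if_neg h1, if_neg h2, if_neg h3, if_neg h4, if_neg h5, if_neg h6, if_neg h7, if_neg h8, if_neg h9, if_neg h10, if_neg (show ¬(1130 ≤ c ∧ c ≤ 1175) by omega), if_neg (show ¬(1180 ≤ c ∧ c ≤ 1225) by omega)]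
  by_cases h12 : 1130 ≤ c ∧ c ≤ 1175
  · simp only [if_pos h12, if_neg h1, if_neg h2, if_neg h3, if_neg h4, if_neg h5, if_neg h6, if_neg h7, if_neg h8, if_neg h9, if_neg h10, if_neg h11, if_neg (show ¬(1180 ≤ c ∧ c ≤ 1225) by omega)]
  by_cases h13 : 1180 ≤ c ∧ c ≤ 1225
  · simp only [if_pos h13, if_neg h1, if_neg h2, if_neg h3, if_neg h4, if_neg h5, if_neg h6, if_neg h7, if_neg h8, if_neg h9, if_neg h10, if_neg h11, if_neg h12]
  simp only [if_neg h1, if_neg h2, if_neg h3, if_neg h4, if_neg h5, if_neg h6, if_neg h7, if_neg h8, if_neg h9, if_neg h10, if_neg h11, if_neg h12, if_neg h13]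

theorem scan_eq_spec (c : Int) :
    timeToSlotGo 0 c (PySem.List.enumerate timeSlots 1) = slotSpec c := by
  simp only [timeSlots, PySem.List.enumerate_cons, PySem.List.enumerate_nil, timeToSlotGo, slotSpec]
  norm_num

theorem scan_only_current (hour minute : Int) :
    timeToSlotGo hour minute (PySem.List.enumerate timeSlots 1)
      = timeToSlotGo 0 (hour * 60 + minute) (PySem.List.enumerate timeSlots 1) := by
  simp [timeSlots, PySem.List.enumerate, timeToSlotGo]

-- ===== VERDICT (by name: the statement is the Claim_ definition above) =====
theorem time_to_slot_spec : Claim_equal_time_to_slot := by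
  intro hour minute _
  show time_to_slot hour minute = time_to_slot_alt hour minute
  rw [time_to_slot, scan_only_current, scan_eq_spec]
  rw [time_to_slot_alt, lookup_eq_spec]
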